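-- pv_equiv track=rewrite | github.com/laxel/AdventOfCode | 2024/d02/d02.py | calc_safe
-- ===== SOURCE A (Python) =====
-- def calc_safe(int_list):
--     pdiff = 0
--     for i in range(1, len(int_list)):
--         diff = int_list[i-1]-int_list[i]
--         if (abs(diff) > 3) or (diff == 0) or (diff*pdiff < 0):
--             return False
--         pdiff = diff
--     return True
-- ===== SOURCE B (Python) =====
-- def calc_safe(int_list):
--     diffs = [a - b for a, b in zip(int_list, int_list[1:])]
--     return (all(d != 0 and abs(d) <= 3 for d in diffs)
--             and (all(d > 0 for d in diffs) or all(d < 0 for d in diffs)))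
-- ===== Notes on version B (the rewrite author's own statement) =====
-- stated objective: simpler
-- what changed: Replaces the index loop with running previous-diff sign state and early return by building the list of consecutive differences once and judging it with three global all() scans (bounded nonzero steps, and all increasing or all decreasing).
import Mathlib
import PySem

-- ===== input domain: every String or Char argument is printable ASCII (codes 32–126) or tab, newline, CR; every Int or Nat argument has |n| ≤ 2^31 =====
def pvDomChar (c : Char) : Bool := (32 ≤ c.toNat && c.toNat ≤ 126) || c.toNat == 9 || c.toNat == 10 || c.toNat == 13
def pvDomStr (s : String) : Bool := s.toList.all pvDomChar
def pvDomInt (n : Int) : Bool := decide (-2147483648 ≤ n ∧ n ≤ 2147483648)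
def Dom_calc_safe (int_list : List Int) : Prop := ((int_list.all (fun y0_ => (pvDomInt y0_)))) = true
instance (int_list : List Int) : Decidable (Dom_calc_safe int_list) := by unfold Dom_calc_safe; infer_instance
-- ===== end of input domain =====

-- B builds the consecutive-difference list once and judges it with three global all scans,
-- replacing A's index loop with previous-diff sign state and early return (simpler decomposition).


-- ===== PORT A =====
-- index loop 'for i in range(1, len(int_list))' with state pdiff and early return False
def calcSafeGoA (l : List Int) (pdiff : Int) (i : Nat) : Bool :=
  if _h : i < l.length then
    let diff := l.getD (i - 1) 0 - l.getD i 0   -- both indexes are in range whenever taken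
    if |diff| > 3 ∨ diff = 0 ∨ diff * pdiff < 0 then false
    else calcSafeGoA l diff (i + 1)
  else true
termination_by l.length - i

def calc_safe (int_list : List Int) : Bool := calcSafeGoA int_list 0 1

-- ===== PORT B =====
def calc_safe_alt (int_list : List Int) : Bool :=
  let diffs := (int_list.zip (int_list.drop 1)).map (fun p => p.1 - p.2)
  (diffs.all fun d => decide (d ≠ 0) && decide (|d| ≤ 3)) &&
    ((diffs.all fun d => decide (0 < d)) || (diffs.all fun d => decide (d < 0)))

-- ===== PRECONDITION & SPEC =====
def Spec_calc_safe (int_list : List Int) (out : Bool) : Prop := out = calc_safe_alt int_list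
instance (int_list : List Int) (out : Bool) : Decidable (Spec_calc_safe int_list out) := by unfold Spec_calc_safe; infer_instance

-- ===== CLAIM (what is proved, stated in full; the proofs are below) =====
def Claim_equal_calc_safe : Prop := ∀ (int_list : List Int), Dom_calc_safe int_list → Spec_calc_safe int_list (calc_safe int_list)

-- ===== LEMMAS AND PROOFS =====

-- the diff list B scans
def pvDiffs (l : List Int) : List Int := (l.zip (l.drop 1)).map (fun p => p.1 - p.2)

-- A's loop, re-expressed over the remaining diff list
def pvScan (ds : List Int) (pdiff : Int) : Bool :=
  match ds with
  | [] => true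
  | d :: rest =>
    if |d| > 3 ∨ d = 0 ∨ d * pdiff < 0 then false else pvScan rest d

theorem pvDiffs_length (l : List Int) : (pvDiffs l).length = l.length - 1 := by
  simp [pvDiffs]

theorem pvDiffs_get (l : List Int) (i : Nat) (h : i + 1 < l.length) :
    (pvDiffs l).getD i 0 = l.getD i 0 - l.getD (i + 1) 0 := by
  have hlen : i < (l.zip l.tail).length := by
    simp [List.length_zip]; omega
  simp [pvDiffs, List.getD, List.drop_one, List.getElem?_eq_getElem hlen, List.getElem_zip,
    List.getElem_tail, List.getElem?_eq_getElem h,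
    List.getElem?_eq_getElem (show i < l.length by omega)]

theorem pvDiffs_drop_cons (l : List Int) (i : Nat) (h : i + 1 < l.length) :
    (pvDiffs l).drop i = (l.getD i 0 - l.getD (i + 1) 0) :: (pvDiffs l).drop (i + 1) := by
  have hi : i < (pvDiffs l).length := by rw [pvDiffs_length]; omega
  rw [List.drop_eq_getElem_cons hi]
  congr 1
  have := pvDiffs_get l i h
  simpa [List.getD, List.getElem?_eq_getElem hi] using this

theorem goA_eq_scan (l : List Int) (i : Nat) (pdiff : Int) :
    calcSafeGoA l pdiff (i + 1) = pvScan ((pvDiffs l).drop i) pdiff := by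
  by_cases h : i + 1 < l.length
  · rw [pvDiffs_drop_cons l i h, calcSafeGoA]
    simp only [dif_pos h]
    have hd : l.getD (i + 1 - 1) 0 - l.getD (i + 1) 0 = l.getD i 0 - l.getD (i + 1) 0 := by
      simp
    rw [pvScan]
    split_ifs with hc hc' hc'
    · rfl
    · exact absurd (by simpa [hd] using hc) hc'
    · exact absurd (by simpa [hd] using hc') hc
    · simpa [hd] using goA_eq_scan l (i + 1) (l.getD i 0 - l.getD (i + 1) 0)
  · have hdrop : (pvDiffs l).drop i = [] := by
      apply List.drop_eq_nil_of_le; rw [pvDiffs_length]; omega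
    rw [calcSafeGoA]
    simp [h, hdrop, pvScan]
termination_by l.length - i

theorem scan_pos (ds : List Int) (p : Int) (hp : 0 < p) :
    pvScan ds p = ds.all fun d => decide (0 < d) && decide (d ≤ 3) := by
  induction ds generalizing p with
  | nil => rfl
  | cons d rest ih =>
    rw [pvScan, List.all_cons]
    by_cases hd : 0 < d ∧ d ≤ 3
    · have : ¬ (|d| > 3 ∨ d = 0 ∨ d * p < 0) := by
        push Not
        exact ⟨by rw [abs_le]; omega, by omega, le_of_lt (mul_pos hd.1 hp)⟩
      rw [if_neg this, ih d hd.1]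
      simp [hd.1, hd.2]
    · have : |d| > 3 ∨ d = 0 ∨ d * p < 0 := by
        rcases lt_trichotomy d 0 with h0 | h0 | h0
        · exact Or.inr (Or.inr (mul_neg_of_neg_of_pos h0 hp))
        · exact Or.inr (Or.inl h0)
        · left; rw [abs_of_pos h0]; omega
      rw [if_pos this]
      have : ¬ (0 < d) ∨ ¬ (d ≤ 3) := by tauto
      rcases this with h | h <;> simp [h]

theorem scan_neg (ds : List Int) (p : Int) (hp : p < 0) :
    pvScan ds p = ds.all fun d => decide (d < 0) && decide (-3 ≤ d) := by
  induction ds generalizing p with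
  | nil => rfl
  | cons d rest ih =>
    rw [pvScan, List.all_cons]
    by_cases hd : d < 0 ∧ -3 ≤ d
    · have : ¬ (|d| > 3 ∨ d = 0 ∨ d * p < 0) := by
        push Not
        refine ⟨by rw [abs_le]; omega, by omega, ?_⟩
        exact le_of_lt (mul_pos_of_neg_of_neg hd.1 hp)
      rw [if_neg this, ih d hd.1]
      simp [hd.1, hd.2]
    · have : |d| > 3 ∨ d = 0 ∨ d * p < 0 := by
        rcases lt_trichotomy d 0 with h0 | h0 | h0
        · left; rw [abs_of_neg h0]; omega
        · exact Or.inr (Or.inl h0)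
        · exact Or.inr (Or.inr (mul_neg_of_pos_of_neg h0 hp))
      rw [if_pos this]
      have : ¬ (d < 0) ∨ ¬ (-3 ≤ d) := by tauto
      rcases this with h | h <;> simp [h]

theorem scan_zero_eq_alt (ds : List Int) :
    pvScan ds 0 =
      ((ds.all fun d => decide (d ≠ 0) && decide (|d| ≤ 3)) &&
        ((ds.all fun d => decide (0 < d)) || (ds.all fun d => decide (d < 0)))) := by
  cases ds with
  | nil => rfl
  | cons d rest =>
    rw [pvScan]
    by_cases hd : |d| > 3 ∨ d = 0
    · rw [if_pos (by tauto)]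
      rcases hd with h | h
      · simp [List.all_cons, not_le.mpr h]
      · simp [List.all_cons, h]
    · push Not at hd
      obtain ⟨h3, h0⟩ := hd
      rw [abs_le] at h3
      rw [if_neg (by simp [abs_le]; omega)]
      rcases lt_or_gt_of_ne h0 with hneg | hpos
      · rw [scan_neg rest d hneg, Bool.eq_iff_iff]
        simp only [List.all_cons, List.all_eq_true, Bool.and_eq_true, Bool.or_eq_true,
          decide_eq_true_eq, ne_eq, abs_le]
        constructor
        · intro h
          refine ⟨⟨⟨h0, h3⟩, fun x hx => ?_⟩, Or.inr ⟨hneg, fun x hx => (h x hx).1⟩⟩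
          have := h x hx; exact ⟨by omega, by omega⟩
        · rintro ⟨⟨_, hall1⟩, hor⟩ x hx
          rcases hor with ⟨hd0, _⟩ | ⟨_, hall3⟩
          · omega
          · have h1 := hall1 x hx; have h2 := hall3 x hx
            exact ⟨h2, by omega⟩
      · rw [scan_pos rest d hpos, Bool.eq_iff_iff]
        simp only [List.all_cons, List.all_eq_true, Bool.and_eq_true, Bool.or_eq_true,
          decide_eq_true_eq, ne_eq, abs_le]
        constructor
        · intro h
          refine ⟨⟨⟨h0, h3⟩, fun x hx => ?_⟩, Or.inl ⟨hpos, fun x hx => (h x hx).1⟩⟩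
          have := h x hx; exact ⟨by omega, by omega⟩
        · rintro ⟨⟨_, hall1⟩, hor⟩ x hx
          rcases hor with ⟨_, hall2⟩ | ⟨hd0, _⟩
          · have h1 := hall1 x hx; have h2 := hall2 x hx
            exact ⟨h2, by omega⟩
          · omega

-- ===== VERDICT (by name: the statement is the Claim_ definition above) =====
theorem calc_safe_spec : Claim_equal_calc_safe := by
  intro l _
  unfold Spec_calc_safe calc_safe calc_safe_alt
  have h1 : calcSafeGoA l 0 1 = pvScan ((pvDiffs l).drop 0) 0 := goA_eq_scan l 0 0
  rw [h1, List.drop_zero, scan_zero_eq_alt]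
  rfl
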